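-- pv_equiv track=rewrite | github.com/nguyenngochuy91/companyQuestions | facebook/phoneScreen/countDifferentPalindromicSubsequences.py | findPalindromicSubsequencesNaive
-- ===== SOURCE A (Python) =====
-- from collections import deque
--
-- def findPalindromicSubsequencesNaive(s):
--     res=deque([""])
--     for letter in s:
--         size = len(res)
--         for i in range(size):
--             item = res.popleft()
--             res.append(item+letter)
--             res.append(item)
--     return [item for item in res if checkPalindrome(item)]
--
-- def checkPalindrome(string):
--     if not string:
--         return False
--     for i in range(len(string)//2):
--         if string[i]!=string[len(string)-1-i]:
--             return False
--     return True
-- ===== SOURCE B (Python) =====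
-- def findPalindromicSubsequencesNaive(s):
--     def gen(i):
--         if i == len(s):
--             return [""]
--         rest = gen(i + 1)
--         return [s[i] + x for x in rest] + rest
--     return [x for x in gen(0) if x and x == x[::-1]]
-- ===== Notes on version B (the rewrite author's own statement) =====
-- stated objective: simpler
-- what changed: Replaced the iterative deque-doubling queue and the index-loop palindrome checker with a direct recursion over the string's suffixes (include-letter branch first, then exclude) and an inlined x == x[::-1] test.
import Mathlib
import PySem

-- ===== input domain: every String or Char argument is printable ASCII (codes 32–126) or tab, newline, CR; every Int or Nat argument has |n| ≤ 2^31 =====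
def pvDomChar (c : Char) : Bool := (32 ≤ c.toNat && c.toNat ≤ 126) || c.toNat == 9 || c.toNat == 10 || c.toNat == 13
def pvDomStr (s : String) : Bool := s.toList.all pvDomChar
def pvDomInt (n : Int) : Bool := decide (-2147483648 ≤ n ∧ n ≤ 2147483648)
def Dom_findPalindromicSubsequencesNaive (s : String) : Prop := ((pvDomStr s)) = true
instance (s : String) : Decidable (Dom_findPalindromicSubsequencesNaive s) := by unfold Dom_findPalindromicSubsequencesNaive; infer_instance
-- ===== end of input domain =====

-- B replaces A's iterative deque-doubling + index-loop palindrome check with a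
-- recursion over the suffixes and an inlined reverse-equality test (objective: simpler).

-- ===== PORT A =====
-- checkPalindrome, over List Char (PySem convention: strings as their character lists)
def pvCheckPalindrome (l : List Char) : Bool :=
  if l.isEmpty then false
  else (List.range (l.length / 2)).all (fun i => l.getD i ' ' == l.getD (l.length - 1 - i) ' ')

-- the inner 'for i in range(size): item = res.popleft(); res.append(item+letter); res.append(item)'
def pvInner : Nat → List (List Char) → Char → List (List Char)
  | 0, q, _ => q
  | _ + 1, [], _ => []   -- unreachable: size = len(res), so the queue never runs empty
  | n + 1, item :: rest, c => pvInner n (rest ++ [item ++ [c], item]) c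

def findPalindromicSubsequencesNaive (s : String) : List String :=
  let res := s.toList.foldl (fun q c => pvInner q.length q c) [[]]
  (res.filter pvCheckPalindrome).map String.ofList

-- ===== PORT B =====
-- gen(i): recursion over the suffix of s (included-letter branch first)
def pvGen : List Char → List (List Char)
  | [] => [[]]
  | c :: rest =>
    let r := pvGen rest
    r.map (fun x => c :: x) ++ r

def findPalindromicSubsequencesNaive_alt (s : String) : List String :=
  ((pvGen s.toList).filter (fun x => !x.isEmpty && x == x.reverse)).map String.ofList

-- ===== PRECONDITION & SPEC =====
def Spec_findPalindromicSubsequencesNaive (s : String) (out : List String) : Prop := out = findPalindromicSubsequencesNaive_alt s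
instance (s : String) (out : List String) : Decidable (Spec_findPalindromicSubsequencesNaive s out) := by unfold Spec_findPalindromicSubsequencesNaive; infer_instance

-- ===== CLAIM (what is proved, stated in full; the proofs are below) =====
def Claim_equal_findPalindromicSubsequencesNaive : Prop := ∀ (s : String), Dom_findPalindromicSubsequencesNaive s → Spec_findPalindromicSubsequencesNaive s (findPalindromicSubsequencesNaive s)

-- ===== LEMMAS AND PROOFS =====

-- one letter's deque pass rewrites the queue by the binary-expansion step
theorem pvInner_eq (c : Char) (q₁ q₂ : List (List Char)) :
    pvInner q₁.length (q₁ ++ q₂) c = q₂ ++ q₁.flatMap (fun item => [item ++ [c], item]) := by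
  induction q₁ generalizing q₂ with
  | nil => simp [pvInner]
  | cons item rest ih =>
    simp only [List.length_cons, List.cons_append, pvInner]
    rw [List.append_assoc, ih]
    simp

-- the whole letter loop, started from any queue, equals prefixing each queue item to B's gen list
theorem foldl_eq_gen (l : List Char) (q : List (List Char)) :
    l.foldl (fun q c => pvInner q.length q c) q
      = q.flatMap (fun item => (pvGen l).map (fun x => item ++ x)) := by
  induction l generalizing q with
  | nil => simp [pvGen]
  | cons c rest ih =>
    simp only [List.foldl_cons]
    rw [show pvInner q.length q c = pvInner q.length (q ++ []) c by simp, pvInner_eq,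
        List.nil_append, ih, List.flatMap_assoc]
    congr 1
    funext item
    simp [pvGen, List.map_map, Function.comp_def, List.append_assoc]

-- A's index-loop palindrome check agrees with the nonempty ∧ reverse-equality test
theorem checkPalindrome_eq (l : List Char) :
    pvCheckPalindrome l = (!l.isEmpty && l == l.reverse) := by
  rcases l with _ | ⟨a, t⟩
  · simp [pvCheckPalindrome]
  · set l := a :: t with hl
    have hne : l.isEmpty = false := by simp [hl]
    have hlpos : 0 < l.length := by simp [hl]
    simp only [pvCheckPalindrome, hne, Bool.false_eq_true, if_false, Bool.not_false,
      Bool.true_and]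
    rw [Bool.eq_iff_iff]
    simp only [List.all_eq_true, List.mem_range, beq_iff_eq]
    constructor
    · intro h
      have key : ∀ j, j < l.length / 2 → l[j]? = l[l.length - 1 - j]? := by
        intro j hj
        have hj1 : j < l.length := by omega
        have hj2 : l.length - 1 - j < l.length := by omega
        have := h j hj
        rw [List.getD_eq_getElem l ' ' hj1, List.getD_eq_getElem l ' ' hj2] at this
        rw [List.getElem?_eq_getElem hj1, List.getElem?_eq_getElem hj2, this]
      apply List.ext_getElem?
      intro i
      by_cases hi : i < l.length
      · rw [List.getElem?_reverse hi]
        by_cases hcase : i < l.length / 2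
        · exact key i hcase
        · by_cases hmid : l.length - 1 - i = i
          · rw [hmid]
          · have hj : l.length - 1 - i < l.length / 2 := by omega
            have hji : l.length - 1 - (l.length - 1 - i) = i := by omega
            have := key _ hj
            rw [hji] at this
            exact this.symm
      · rw [List.getElem?_eq_none (by omega), List.getElem?_eq_none (by simp; omega)]
    · intro h i hi
      have h1 : i < l.length := by omega
      have h2 : l.length - 1 - i < l.length := by omega
      have hopt : l[i]? = l[l.length - 1 - i]? := by
        conv_lhs => rw [h]
        rw [List.getElem?_reverse h1]
      rw [List.getElem?_eq_getElem h1, List.getElem?_eq_getElem h2] at hopt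
      rw [List.getD_eq_getElem l ' ' h1, List.getD_eq_getElem l ' ' h2]
      exact Option.some.inj hopt

-- ===== VERDICT (by name: the statement is the Claim_ definition above) =====
theorem findPalindromicSubsequencesNaive_spec : Claim_equal_findPalindromicSubsequencesNaive := by
  intro s _
  unfold Spec_findPalindromicSubsequencesNaive findPalindromicSubsequencesNaive
    findPalindromicSubsequencesNaive_alt
  rw [foldl_eq_gen]
  simp only [List.flatMap_cons, List.flatMap_nil, List.nil_append, List.append_nil]
  congr 1
  rw [show List.map (fun (x : List Char) => x) (pvGen s.toList) = pvGen s.toList from List.map_id' _]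
  apply List.filter_congr
  intro x _
  exact checkPalindrome_eq x
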